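-- pv_equiv track=rewrite | github.com/agoettler/ComputerSecurityAssignment4 | Goettler_Andrew_Assignment_4/vigenereDecrypt.py | binAlphabets
-- ===== SOURCE A (Python) =====
-- from collections import Counter
--
-- def binAlphabets(n, text):
-- 	binnedText = []
-- 	for i in range(0,n):
-- 		binnedText.append(text[i:(len(text)):n])
--
-- 	alphabetList = []
-- 	for text in binnedText:
-- 		alphabet = Counter()
-- 		for c in text:
-- 			alphabet[c] += 1
-- 		alphabetList.append(alphabet)
-- 	return alphabetList
-- ===== SOURCE B (Python) =====
-- from collections import Counter
--
-- def binAlphabets(n, text):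
--     if n <= 0:
--         return []
--     counters = [Counter() for _ in range(n)]
--     for idx, c in enumerate(text):
--         counters[idx % n][c] += 1
--     return counters
-- ===== Notes on version B (the rewrite author's own statement) =====
-- stated objective: simpler
-- what changed: Replaces A's two phases (build n strided slices of the text, then count each slice) with a single enumerate pass that increments counters[idx % n][c], dropping the intermediate binnedText list.
import Mathlib
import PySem

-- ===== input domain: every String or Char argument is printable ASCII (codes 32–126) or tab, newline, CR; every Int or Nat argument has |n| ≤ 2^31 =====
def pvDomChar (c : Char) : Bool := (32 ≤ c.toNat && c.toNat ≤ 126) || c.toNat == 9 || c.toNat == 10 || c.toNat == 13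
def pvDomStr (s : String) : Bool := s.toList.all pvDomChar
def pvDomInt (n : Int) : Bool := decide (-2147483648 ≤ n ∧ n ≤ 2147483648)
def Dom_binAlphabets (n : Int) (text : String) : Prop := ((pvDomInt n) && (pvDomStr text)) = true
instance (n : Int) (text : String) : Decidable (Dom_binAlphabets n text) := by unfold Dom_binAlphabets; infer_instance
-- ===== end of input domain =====

-- B fuses A's two phases (slice the text into n strided bins, then count each bin) into one
-- enumerate pass over the text incrementing counters[idx % n][c]; same result, no binnedText list.

-- ===== PORT A =====
def binAlphabets (n : Int) (text : String) : List (List (String × Int)) :=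
  let cs := text.toList
  -- binnedText = []; for i in range(0, n): binnedText.append(text[i:len(text):n])
  let binnedText : List (List Char) :=
    (PySem.List.pyRange 0 n 1).foldl
      (fun acc i => acc ++ [(PySem.List.slice? cs (some i) (some (PySem.List.len cs)) n).getD []]) []
  -- alphabetList = []; for text in binnedText: alphabet = Counter(); for c in text: alphabet[c] += 1
  binnedText.foldl
    (fun acc t =>
      acc ++ [(t.foldl (fun a c => a.modify (String.ofList [c]) 0 (· + 1))
                (PySem.Dict.empty : PySem.Dict String Int)).items]) []

-- ===== PORT B =====
def binAlphabets_alt (n : Int) (text : String) : List (List (String × Int)) :=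
  if n ≤ 0 then []
  else
    -- counters = [Counter() for _ in range(n)]
    let counters : List (PySem.Dict String Int) := (List.range n.toNat).map (fun _ => PySem.Dict.empty)
    -- for idx, c in enumerate(text): counters[idx % n][c] += 1
    let final := (PySem.List.enumerate text.toList 0).foldl
      (fun ds p =>
        PySem.List.pySetD ds (PySem.Int.mod p.1 n)
          ((PySem.List.pyGetD ds (PySem.Int.mod p.1 n) PySem.Dict.empty).modify
            (String.ofList [p.2]) 0 (· + 1))) counters
    final.map (fun d => d.items)

-- ===== PRECONDITION & SPEC =====
def Spec_binAlphabets (n : Int) (text : String) (out : List (List (String × Int))) : Prop := out = binAlphabets_alt n text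
instance (n : Int) (text : String) (out : List (List (String × Int))) : Decidable (Spec_binAlphabets n text out) := by unfold Spec_binAlphabets; infer_instance

-- ===== CLAIM (what is proved, stated in full; the proofs are below) =====
def Claim_equal_binAlphabets : Prop := ∀ (n : Int) (text : String), Dom_binAlphabets n text → Spec_binAlphabets n text (binAlphabets n text)

-- ===== LEMMAS AND PROOFS =====

-- every m-th element, starting with the first (= Python's ys[::m] for m > 0)
def pvTakeEvery {α : Type} (m : Nat) : List α → List α
  | [] => []
  | x :: l => x :: pvTakeEvery m (l.drop (m - 1))
termination_by xs => xs.length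
decreasing_by simp

-- B's bin membership: among elements indexed from s, those with index ≡ s (mod m) are every m-th one
theorem pvBin_zip {α : Type} (m : Nat) (hm : 0 < m) :
    ∀ (ys : List α) (s : Nat), ((ys.zipIdx s).filter (fun p => p.2 % m == s % m)).map Prod.fst
      = pvTakeEvery m ys := by
  intro ys
  induction ys using pvTakeEvery.induct (α := α) m with
  | case1 => intro s; simp [pvTakeEvery]
  | case2 y l ih =>
    intro s
    rw [pvTakeEvery]
    have hsplit : l = l.take (m - 1) ++ l.drop (m - 1) := (List.take_append_drop _ _).symm
    rw [List.zipIdx_cons]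
    conv_lhs => rw [hsplit]
    rw [List.zipIdx_append, List.filter_cons]
    have h1 : (List.filter (fun p => p.2 % m == s % m) ((l.take (m - 1)).zipIdx (s + 1))) = [] := by
      apply List.filter_eq_nil_iff.mpr
      rintro ⟨x, i⟩ hmem
      have h := List.mem_zipIdx hmem
      have hlen : (l.take (m - 1)).length ≤ m - 1 := by simp
      simp only [beq_iff_eq]
      intro hcontra
      have hdvd : m ∣ (i - s) :=
        (Nat.modEq_iff_dvd' (show s ≤ i by omega)).mp hcontra.symm
      have := Nat.le_of_dvd (by omega) hdvd
      omega
    simp only [List.filter_append, h1, List.nil_append, beq_self_eq_true, if_pos, List.map_cons]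
    congr 1
    by_cases hlong : m - 1 ≤ l.length
    · have ht : (l.take (m - 1)).length = m - 1 := by simp [hlong]
      rw [ht]
      have hoff : s + 1 + (m - 1) = s + m := by omega
      rw [hoff]
      have := ih (s + m)
      rwa [Nat.add_mod_right] at this
    · have hd : l.drop (m - 1) = [] := List.drop_eq_nil_of_le (by omega)
      rw [hd]
      simp [pvTakeEvery]

-- B's bin j (indices ≡ j mod m, j < m) is every m-th element of xs.drop j
theorem pvBin_drop {α : Type} (m j : Nat) (hm : 0 < m) (hj : j < m) (xs : List α) :
    ((xs.zipIdx 0).filter (fun p => p.2 % m == j)).map Prod.fst = pvTakeEvery m (xs.drop j) := by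
  have hsplit : xs = xs.take j ++ xs.drop j := (List.take_append_drop _ _).symm
  conv_lhs => rw [hsplit]
  rw [List.zipIdx_append, List.filter_append, List.map_append]
  have h1 : (List.filter (fun p => p.2 % m == j) ((xs.take j).zipIdx 0)) = [] := by
    apply List.filter_eq_nil_iff.mpr
    rintro ⟨x, i⟩ hmem
    have h := List.mem_zipIdx hmem
    have hlen : (xs.take j).length ≤ j := by simp
    simp only [beq_iff_eq]
    have hi : i < j := by omega
    rw [Nat.mod_eq_of_lt (by omega)]
    omega
  rw [h1]
  simp only [List.map_nil, List.nil_append]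
  by_cases hlong : j ≤ xs.length
  · have ht : (xs.take j).length = j := by simp [hlong]
    rw [ht, Nat.zero_add]
    have := pvBin_zip m hm (xs.drop j) j
    rwa [Nat.mod_eq_of_lt hj] at this
  · have hd : xs.drop j = [] := List.drop_eq_nil_of_le (by omega)
    rw [hd]
    simp [pvTakeEvery]

-- the strided index walk of slice? is pvTakeEvery
theorem pvStrided {α : Type} (m : Nat) (hm : 0 < m) :
    ∀ ys : List α, (List.range ((ys.length + (m - 1)) / m)).filterMap (fun k => ys[m * k]?)
      = pvTakeEvery m ys := by
  intro ys
  induction ys using pvTakeEvery.induct (α := α) m with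
  | case1 =>
    have : ((0 : Nat) + (m - 1)) / m = 0 := Nat.div_eq_of_lt (by omega)
    simp only [List.length_nil, this, List.range_zero, List.filterMap_nil, pvTakeEvery]
  | case2 y l ih =>
    have hcnt : ((y :: l).length + (m - 1)) / m = l.length / m + 1 := by
      simp only [List.length_cons]
      rw [show l.length + 1 + (m - 1) = l.length + m by omega, Nat.add_div_right _ hm]
    rw [pvTakeEvery, hcnt, List.range_succ_eq_map, List.filterMap_cons, List.filterMap_map]
    simp only [Nat.mul_zero, List.getElem?_cons_zero]
    congr 1
    have hstep : ∀ k : Nat, (y :: l)[m * Nat.succ k]? = (l.drop (m - 1))[m * k]? := by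
      intro k
      have h1 : m * Nat.succ k = (m - 1 + m * k) + 1 := by
        rw [Nat.mul_succ]; omega
      rw [h1, List.getElem?_cons_succ, List.getElem?_drop]
    have hcnt2 : l.length / m = ((l.drop (m - 1)).length + (m - 1)) / m := by
      rw [List.length_drop]
      by_cases hlong : m - 1 ≤ l.length
      · congr 1; omega
      · rw [Nat.div_eq_of_lt (by omega), Nat.div_eq_of_lt (by omega)]
    calc (List.range (l.length / m)).filterMap (fun k => (y :: l)[m * Nat.succ k]?)
        = (List.range (l.length / m)).filterMap (fun k => (l.drop (m - 1))[m * k]?) := by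
          apply List.filterMap_congr; intro k _; exact hstep k
      _ = pvTakeEvery m (l.drop (m - 1)) := by rw [hcnt2]; exact ih

-- computing slice? at the arguments A uses: start j ≥ 0, stop len, positive step m
theorem pvSliceRange {α : Type} (m j : Nat) (hm : 0 < m) (xs : List α) :
    PySem.List.slice? xs (some (j : Int)) (some (PySem.List.len xs)) (m : Int)
      = some ((List.range (if j < xs.length then (xs.length - j + (m - 1)) / m else 0)).filterMap
          (fun k => xs[j + m * k]?)) := by
  have hm' : (m : Int) ≠ 0 := by exact_mod_cast hm.ne'
  have hmneg : ¬ ((m : Int) < 0) := by omega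
  have hmpos : (0 : Int) < (m : Int) := by exact_mod_cast hm
  simp only [PySem.List.slice?, PySem.List.sliceIndices, PySem.List.len]
  have hjge : ¬ ((j : Int) < 0) := by omega
  have hlge : ¬ ((xs.length : Int) < 0) := by omega
  simp only [if_neg hm', if_neg hmneg, if_neg hjge, if_neg hlge, if_pos hmpos, min_self]
  by_cases hcase : j < xs.length
  · have hmin : min (j : Int) (xs.length : Int) = (j : Int) := by
      apply min_eq_left; exact_mod_cast hcase.le
    rw [hmin, if_pos hcase]
    rw [if_pos (show (j : Int) < (xs.length : Int) by exact_mod_cast hcase)]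
    congr 1
    have hcnt : ((xs.length : Int) - (j : Int) + (m : Int) - 1) / (m : Int)
        = ((xs.length - j + (m - 1) : Nat) : Int) / ((m : Nat) : Int) := by
      congr 1; push_cast; omega
    rw [hcnt, ← Int.natCast_div, Int.toNat_natCast]
    apply List.filterMap_congr
    intro k _
    congr 1
  · have hmin : min (j : Int) (xs.length : Int) = (xs.length : Int) := by
      apply min_eq_right; exact_mod_cast (by omega : xs.length ≤ j)
    rw [hmin, if_neg hcase]
    simp

-- A's bin j: text[j : len(text) : m] = every m-th element of xs.drop j
theorem pvSlice {α : Type} (m j : Nat) (hm : 0 < m) (xs : List α) :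
    PySem.List.slice? xs (some (j : Int)) (some (PySem.List.len xs)) (m : Int)
      = some (pvTakeEvery m (xs.drop j)) := by
  rw [pvSliceRange m j hm xs]
  congr 1
  by_cases hcase : j < xs.length
  · rw [if_pos hcase]
    have hlen : (xs.drop j).length = xs.length - j := List.length_drop
    calc (List.range ((xs.length - j + (m - 1)) / m)).filterMap (fun k => xs[j + m * k]?)
        = (List.range (((xs.drop j).length + (m - 1)) / m)).filterMap (fun k => (xs.drop j)[m * k]?) := by
          rw [hlen]
          apply List.filterMap_congr
          intro k _
          rw [List.getElem?_drop]
      _ = pvTakeEvery m (xs.drop j) := pvStrided m hm _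
  · rw [if_neg hcase]
    have hd : xs.drop j = [] := List.drop_eq_nil_of_le (by omega)
    rw [hd]
    simp [pvTakeEvery]

-- B's loop invariant: after folding the enumerate pass, counter j holds the fold of f over bin j
theorem pvFold (m : Nat) :
    ∀ (xs : List Char) (s : Nat) (ds : List (PySem.Dict String Int)), ds.length = m →
    (PySem.List.enumerate xs (s : Int)).foldl
      (fun ds p =>
        PySem.List.pySetD ds (PySem.Int.mod p.1 (m : Int))
          ((PySem.List.pyGetD ds (PySem.Int.mod p.1 (m : Int)) PySem.Dict.empty).modify
            (String.ofList [p.2]) 0 (· + 1))) ds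
    = (List.range m).map (fun j =>
        (((xs.zipIdx s).filter (fun p => p.2 % m == j)).map Prod.fst).foldl
          (fun a c => a.modify (String.ofList [c]) 0 (· + 1)) (ds.getD j PySem.Dict.empty)) := by
  intro xs
  induction xs with
  | nil =>
    intro s ds hds
    simp only [PySem.List.enumerate_nil, List.foldl_nil, List.zipIdx_nil, List.filter_nil,
      List.map_nil]
    apply List.ext_getElem (by simp [hds])
    intro i h1 h2
    simp [List.getD_eq_getElem?_getD, h1]
  | cons c xs ih =>
    intro s ds hds
    rw [PySem.List.enumerate_cons, List.foldl_cons]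
    have hcast : (s : Int) + 1 = ((s + 1 : Nat) : Int) := by push_cast; ring
    rw [hcast, PySem.Int.mod_natCast, PySem.List.pySetD_natCast, PySem.List.pyGetD_natCast]
    set v := (ds.getD (s % m) PySem.Dict.empty).modify (String.ofList [c]) 0 (· + 1) with hv
    rw [ih (s + 1) (ds.set (s % m) v) (by simp [hds])]
    apply List.map_congr_left
    intro j hj
    have hjm : j < m := List.mem_range.mp hj
    have hgetset : (ds.set (s % m) v).getD j PySem.Dict.empty
        = if s % m = j then v else ds.getD j PySem.Dict.empty := by
      rw [List.getD_eq_getElem?_getD, List.getElem?_set]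
      by_cases he : s % m = j
      · rw [if_pos he, if_pos (by omega : s % m < ds.length), if_pos he,
          Option.getD_some]
      · rw [if_neg he, if_neg he, List.getD_eq_getElem?_getD]
    rw [List.zipIdx_cons, List.filter_cons]
    by_cases he : s % m = j
    · simp only [he, beq_self_eq_true, if_pos, List.map_cons, List.foldl_cons, hv]
      congr 1
      rw [List.getD_eq_getElem?_getD, List.getElem?_set, if_pos rfl,
        if_pos (by omega : j < ds.length), Option.getD_some]
    · have : ((c, s).2 % m == j) = false := by simp [he]
      simp only [hgetset, if_neg he, this, Bool.false_eq_true, if_neg, not_false_iff]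

-- ===== VERDICT (by name: the statement is the Claim_ definition above) =====
theorem binAlphabets_spec : Claim_equal_binAlphabets := by
  intro n text _
  unfold Spec_binAlphabets binAlphabets binAlphabets_alt
  dsimp only
  by_cases hn : n ≤ 0
  · have hr : PySem.List.pyRange 0 n 1 = [] := by
      simp [PySem.List.pyRange]; omega
    rw [if_pos hn, hr]
    simp
  · rw [if_neg hn]
    have hm : 0 < n.toNat := by omega
    have hnm : n = (n.toNat : Int) := by omega
    set m := n.toNat with hmdef
    set cs := text.toList with hcs
    set f : PySem.Dict String Int → Char → PySem.Dict String Int :=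
      fun a c => a.modify (String.ofList [c]) 0 (· + 1) with hf
    -- A: two append-singleton folds become maps over range m
    simp only [PySem.List.foldl_append_singleton_eq_map, List.nil_append]
    rw [hnm, PySem.List.pyRange_zero_natCast, List.map_map, List.map_map]
    -- B: the enumerate fold becomes a map over range m via the loop invariant
    have henum : PySem.List.enumerate cs 0 = PySem.List.enumerate cs ((0 : Nat) : Int) := by
      norm_num
    rw [henum, pvFold m cs 0 ((List.range m).map fun _ => PySem.Dict.empty)
      (by simp), List.map_map]
    apply List.map_congr_left
    intro j hj
    have hjm : j < m := List.mem_range.mp hj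
    have hinit : (((List.range m).map fun _ => (PySem.Dict.empty : PySem.Dict String Int)).getD j
        PySem.Dict.empty) = PySem.Dict.empty := by
      rw [List.getD_eq_getElem?_getD, List.getElem?_map, List.getElem?_range hjm]
      rfl
    have hbin := pvBin_drop m j hm hjm cs
    have hslice := pvSlice m j hm cs
    simp only [Function.comp_apply, hinit, hbin, hnm] at *
    rw [hslice]
    rfl
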